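-- pv_equiv track=rewrite | github.com/MensaToday/mensa-today | mensa_recommend/mensa_recommend/source/recommendation/recommender.py | encode_binary
-- ===== SOURCE A (Python) =====
-- from typing import List, Tuple, Dict
--
-- def encode_binary(att_list: List[List[int]]) -> List[List[int]]:
--     """Encode an attribute list containing lists of integers for each item to
--     binary attributes. Every item (dim=0) may contain a different number of
--     attributes.
--
--     Parameters
--     ----------
--     att_list : list
--         The list of attribute-lists.
--
--     Return
--     ------
--     res : List[List[int]]
--         The binary encoded attribute list. All items now have same
--         attribute-list lengths and binary values only.
--     """
--     if len(att_list) == 0: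
--         return []
--
--     max_val = max(att_list)
--     if len(max_val) == 0:
--         return []
--     max_val = max_val[0]
--
--     res = []
--
--     for obj in att_list:
--         part = []
--         for value in range(max_val):
--             part.append(1 if value in obj else 0)
--         res.append(part)
--     return res
-- ===== SOURCE B (Python) =====
-- from typing import List
--
--
-- def encode_binary(att_list: List[List[int]]) -> List[List[int]]:
--     """Binary-encode attribute lists: mark-present over a pre-allocated
--     zero array instead of testing membership at every slot."""
--     if len(att_list) == 0:
--         return []
--
--     max_val = max(att_list)
--     if len(max_val) == 0:
--         return []
--     max_val = max_val[0]
--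
--     n = max(max_val, 0)
--
--     def mark(obj):
--         part = [0] * n
--         for v in obj:
--             if 0 <= v < n:
--                 part[v] = 1
--         return part
--
--     return [mark(obj) for obj in att_list]
-- ===== Notes on version B (the rewrite author's own statement) =====
-- stated objective: faster
-- what changed: Instead of scanning every position in range(max_val) and testing membership in obj (a linear scan per slot), B pre-allocates a zero array per item and marks part[v]=1 for each element v of obj that lies in [0, max_val), removing the inner membership scan.
import Mathlib
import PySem

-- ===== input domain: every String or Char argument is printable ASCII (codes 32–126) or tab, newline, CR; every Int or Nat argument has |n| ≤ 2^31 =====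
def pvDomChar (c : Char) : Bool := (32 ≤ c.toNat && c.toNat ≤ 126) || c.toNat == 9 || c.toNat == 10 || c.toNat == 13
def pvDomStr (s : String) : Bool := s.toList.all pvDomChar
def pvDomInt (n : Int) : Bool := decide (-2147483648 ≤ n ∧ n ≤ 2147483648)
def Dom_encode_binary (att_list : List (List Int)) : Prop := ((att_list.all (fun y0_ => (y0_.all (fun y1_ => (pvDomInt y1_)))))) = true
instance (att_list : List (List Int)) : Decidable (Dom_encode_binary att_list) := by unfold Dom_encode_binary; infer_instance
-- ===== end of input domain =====

-- B replaces A's per-slot membership scan over range(max_val) by marking part[v] = 1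
-- over a pre-allocated zero array (the inner membership scan disappears); same header
-- (lexicographic max(att_list) and both empty guards) in both.

-- ===== PORT A =====
def encode_binary (att_list : List (List Int)) : List (List Int) :=
  -- len(att_list) == 0 guard and max(att_list): max? is none exactly on the empty list
  match PySem.List.max? att_list (fun x => x) with
  | none => []
  | some max_val =>
    match max_val with
    | [] => []
    | m :: _ =>
      att_list.foldl
        (fun res obj =>
          res ++ [(PySem.List.pyRange 0 m 1).foldl
            (fun part value => part ++ [if obj.contains value then (1 : Int) else 0]) []])
        []

-- ===== PORT B =====
-- part = [0]*n, then part[v] = 1 for each v of obj with 0 <= v < n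
def markPart (n : Int) (obj : List Int) : List Int :=
  obj.foldl (fun part v => if 0 ≤ v ∧ v < n then part.set v.toNat 1 else part)
    (List.replicate n.toNat 0)

def encode_binary_alt (att_list : List (List Int)) : List (List Int) :=
  match PySem.List.max? att_list (fun x => x) with
  | none => []
  | some max_val =>
    match max_val with
    | [] => []
    | m :: _ =>
      att_list.map (fun obj => markPart (max m 0) obj)

-- ===== PRECONDITION & SPEC =====
def Spec_encode_binary (att_list : List (List Int)) (out : List (List Int)) : Prop := out = encode_binary_alt att_list
instance (att_list : List (List Int)) (out : List (List Int)) : Decidable (Spec_encode_binary att_list out) := by unfold Spec_encode_binary; infer_instance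

-- ===== CLAIM (what is proved, stated in full; the proofs are below) =====
def Claim_equal_encode_binary : Prop := ∀ (att_list : List (List Int)), Dom_encode_binary att_list → Spec_encode_binary att_list (encode_binary att_list)

-- ===== LEMMAS AND PROOFS =====

-- folding "append a singleton" is map
theorem foldl_append_singleton {α β : Type} (f : α → β) (xs : List α) (acc : List β) :
    xs.foldl (fun res obj => res ++ [f obj]) acc = acc ++ xs.map f := by
  induction xs generalizing acc with
  | nil => simp
  | cons x xs ih => simp [List.foldl, ih]

theorem markFold_len (n : Int) (obj : List Int) (p : List Int) :
    (obj.foldl (fun part v => if 0 ≤ v ∧ v < n then part.set v.toNat 1 else part) p).length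
      = p.length := by
  induction obj generalizing p with
  | nil => rfl
  | cons v obj ih =>
    simp only [List.foldl]
    rw [ih]
    split <;> simp

-- each slot of the marking fold is the membership indicator over the start list
theorem markFold_get (n : Int) (obj : List Int) (p : List Int) (hp : p.length = n.toNat)
    (i : Nat) (hi : i < p.length) :
    (obj.foldl (fun part v => if 0 ≤ v ∧ v < n then part.set v.toNat 1 else part) p)[i]'(by
        rw [markFold_len]; exact hi)
      = if obj.contains ((i : Nat) : Int) then 1 else p[i] := by
  induction obj generalizing p with
  | nil => rfl
  | cons v obj ih =>
    simp only [List.foldl_cons]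
    by_cases hmem : ((i : Nat) : Int) ∈ obj
    · by_cases hc : 0 ≤ v ∧ v < n
      · simp only [if_pos hc]
        rw [ih (p.set v.toNat 1) (by simp [hp]) (by simpa using hi)]
        simp [hmem]
      · simp only [if_neg hc]
        rw [ih p hp hi]
        simp [hmem]
    · by_cases hc : 0 ≤ v ∧ v < n
      · simp only [if_pos hc]
        rw [ih (p.set v.toNat 1) (by simp [hp]) (by simpa using hi)]
        have hset : (p.set v.toNat 1)[i]'(by simpa using hi)
            = if v.toNat = i then 1 else p[i] := by rw [List.getElem_set]
        rw [hset]
        by_cases hv : v.toNat = i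
        · have hiv : ((i : Nat) : Int) = v := by omega
          simp [hmem, hiv, hv]
        · have hiv : ((i : Nat) : Int) ≠ v := by omega
          simp [hmem, hiv, hv]
      · simp only [if_neg hc]
        rw [ih p hp hi]
        have hv : ((i : Nat) : Int) ≠ v := by
          have hn : (i : Int) < n := by
            have : i < n.toNat := hp ▸ hi
            omega
          intro h; exact hc ⟨by omega, by omega⟩
        simp [hmem, hv]

-- A's inner row equals B's marked array
theorem part_eq (m : Int) (obj : List Int) :
    (PySem.List.pyRange 0 m 1).map (fun value => if obj.contains value then (1 : Int) else 0)
      = markPart (max m 0) obj := by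
  have hmax : (max m 0).toNat = m.toNat := by omega
  apply List.ext_getElem
  · rw [List.length_map, PySem.List.length_pyRange_one]
    unfold markPart
    rw [markFold_len, List.length_replicate]
    omega
  · intro i h1 h2
    have hi : i < m.toNat := by
      simpa [PySem.List.length_pyRange_one] using h1
    have h3 : i < (List.replicate (max m 0).toNat (0 : Int)).length := by
      rw [List.length_replicate]; omega
    have key : (markPart (max m 0) obj)[i]'h2
        = if obj.contains ((i : Nat) : Int) then (1 : Int) else 0 := by
      have k := markFold_get (max m 0) obj (List.replicate (max m 0).toNat 0)
        (by rw [List.length_replicate]) i h3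
      simp only [List.getElem_replicate] at k
      exact k
    rw [List.getElem_map, PySem.List.getElem_pyRange_one, key]
    norm_num

theorem encode_binary_spec : Claim_equal_encode_binary := by
  intro att_list _
  unfold Spec_encode_binary encode_binary encode_binary_alt
  cases hmax : PySem.List.max? att_list (fun x => x) with
  | none => rfl
  | some max_val =>
    cases max_val with
    | nil => rfl
    | cons m rest =>
      simp only
      rw [foldl_append_singleton
        (fun (obj : List Int) => (PySem.List.pyRange 0 m 1).foldl
          (fun part value => part ++ [if obj.contains value then (1 : Int) else 0]) [])]
      simp only [List.nil_append]
      apply List.map_congr_left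
      intro obj _
      rw [foldl_append_singleton (fun (value : Int) => if obj.contains value then (1 : Int) else 0)]
      simpa using part_eq m obj
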